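-- pv_equiv track=rewrite | github.com/sondongmin0419/study | python/sa_5203.py | run_
-- ===== SOURCE A (Python) =====
-- def run_(li_):
--     li_.sort()
--     cnt = 1
--     for i in range(1, len(li_)):
--         if li_[i] - li_[i-1] == 1:
--             cnt += 1
--         elif li_[i] - li_[i-1] == 0:
--             continue
--         else:
--             cnt = 1
--
--         if cnt == 3:
--             return True
-- ===== SOURCE B (Python) =====
-- def run_(li_):
--     # O(n) hash-set scan instead of sorting; note: A sorts li_ in place, B does not mutate it.
--     s = set(li_)
--     for x in li_:
--         if x + 1 in s and x + 2 in s: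
--             return True
-- ===== Notes on version B (the rewrite author's own statement) =====
-- stated objective: faster
-- what changed: Replaces sort-then-scan-for-a-run with a hash set and a single membership pass (x, x+1, x+2 all present); B does not mutate li_ where A sorts it in place.
import Mathlib
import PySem

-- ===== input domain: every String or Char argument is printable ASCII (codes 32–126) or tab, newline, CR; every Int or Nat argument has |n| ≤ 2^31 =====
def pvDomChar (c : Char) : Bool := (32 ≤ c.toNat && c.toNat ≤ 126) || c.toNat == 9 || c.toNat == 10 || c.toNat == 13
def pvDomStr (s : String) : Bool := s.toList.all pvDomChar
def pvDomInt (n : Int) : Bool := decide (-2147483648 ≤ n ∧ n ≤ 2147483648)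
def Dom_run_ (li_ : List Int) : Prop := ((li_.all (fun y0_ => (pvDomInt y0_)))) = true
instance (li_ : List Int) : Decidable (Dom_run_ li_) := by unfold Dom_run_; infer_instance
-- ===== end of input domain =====

-- B replaces A's sort-then-scan with a hash-set membership pass (x, x+1, x+2 all present): O(n) vs O(n log n).
-- Equivalence is about the RETURN value only: A sorts li_ in place, B does not mutate it.


-- ===== PORT A =====
-- the for-loop over range(1, len(li_)) with early return, as fuel-free structural recursion on the index
def runA_loop (t : List Int) (i : Nat) (cnt : Int) : Option Bool :=
  if h : i < t.length then
    if t.getD i 0 - t.getD (i - 1) 0 = 1 then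
      if cnt + 1 = 3 then some true else runA_loop t (i + 1) (cnt + 1)
    else if t.getD i 0 - t.getD (i - 1) 0 = 0 then
      runA_loop t (i + 1) cnt
    else
      if (1 : Int) = 3 then some true else runA_loop t (i + 1) 1
  else none
termination_by t.length - i

def run_ (li_ : List Int) : Option Bool :=
  runA_loop (PySem.List.sorted li_ (fun x => x) false) 1 1

-- ===== PORT B =====
-- 'for x in li_: if x+1 in s and x+2 in s: return True'
def runB_loop (s : List Int) : List Int → Option Bool
  | [] => none
  | x :: rest => if (x + 1) ∈ s ∧ (x + 2) ∈ s then some true else runB_loop s rest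

def run__alt (li_ : List Int) : Option Bool :=
  runB_loop (PySem.Set.ofList li_) li_

-- ===== PRECONDITION & SPEC =====
def Spec_run_ (li_ : List Int) (out : Option Bool) : Prop := out = run__alt li_
instance (li_ : List Int) (out : Option Bool) : Decidable (Spec_run_ li_ out) := by unfold Spec_run_; infer_instance

-- ===== CLAIM (what is proved, stated in full; the proofs are below) =====
def Claim_equal_run_ : Prop := ∀ (li_ : List Int), Dom_run_ li_ → Spec_run_ li_ (run_ li_)

-- ===== LEMMAS AND PROOFS =====

-- "three consecutive values occur"
def HasTriple (l : List Int) : Prop := ∃ x ∈ l, (x + 1) ∈ l ∧ (x + 2) ∈ l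

-- B-side characterisation
lemma runB_loop_eq (s : List Int) (l : List Int) :
    runB_loop s l = if (∃ x ∈ l, (x + 1) ∈ s ∧ (x + 2) ∈ s) then some true else none := by
  induction l with
  | nil => simp [runB_loop]
  | cons x rest ih =>
      by_cases hx : (x + 1) ∈ s ∧ (x + 2) ∈ s
      · simp only [runB_loop, if_pos hx]
        rw [if_pos ⟨x, List.mem_cons_self, hx.1, hx.2⟩]
      · simp only [runB_loop, if_neg hx, ih]
        by_cases hr : (∃ y ∈ rest, (y + 1) ∈ s ∧ (y + 2) ∈ s)
        · obtain ⟨y, hy, h1, h2⟩ := hr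
          rw [if_pos ⟨y, hy, h1, h2⟩, if_pos ⟨y, List.mem_cons_of_mem _ hy, h1, h2⟩]
        · rw [if_neg hr, if_neg]
          rintro ⟨y, hy, h1, h2⟩
          rcases List.mem_cons.mp hy with rfl | hy'
          · exact hx ⟨h1, h2⟩
          · exact hr ⟨y, hy', h1, h2⟩

lemma run__alt_pos (li_ : List Int) (h : HasTriple li_) : run__alt li_ = some true := by
  unfold run__alt
  rw [runB_loop_eq, if_pos]
  obtain ⟨x, hx, h1, h2⟩ := h
  exact ⟨x, hx, by simpa [PySem.Set.mem_ofList] using h1,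
         by simpa [PySem.Set.mem_ofList] using h2⟩

lemma run__alt_neg (li_ : List Int) (h : ¬ HasTriple li_) : run__alt li_ = none := by
  unfold run__alt
  rw [runB_loop_eq, if_neg]
  rintro ⟨x, hx, h1, h2⟩
  exact h ⟨x, hx, by simpa [PySem.Set.mem_ofList] using h1,
           by simpa [PySem.Set.mem_ofList] using h2⟩

-- A-side: the loop returns only none or some true
lemma runA_loop_ne_false (t : List Int) (i : Nat) (cnt : Int) :
    runA_loop t i cnt = none ∨ runA_loop t i cnt = some true := by
  induction hfu : t.length - i using Nat.strong_induction_on generalizing i cnt with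
  | _ n ih =>
    unfold runA_loop
    split
    · next h =>
      have hlt : t.length - (i + 1) < n := by omega
      split
      · split
        · exact Or.inr rfl
        · exact ih _ hlt _ _ rfl
      · split
        · exact ih _ hlt _ _ rfl
        · simp only [show ¬((1 : Int) = 3) by norm_num, if_false]
          exact ih _ hlt _ _ rfl
    · exact Or.inl rfl

-- A-side soundness: returning true implies a triple exists
lemma runA_loop_sound (t : List Int) :
    ∀ i cnt, 1 ≤ i → (cnt = 1 ∨ (cnt = 2 ∧ (t.getD (i - 1) 0 - 1) ∈ t)) →
    runA_loop t i cnt = some true → HasTriple t := by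
  intro i cnt h1 hinv hrun
  induction hfu : t.length - i using Nat.strong_induction_on generalizing i cnt with
  | _ n ih =>
    rw [runA_loop] at hrun
    split at hrun
    · next h =>
      have hi1 : i - 1 < t.length := by omega
      have hgi : t.getD i 0 = t[i] := List.getD_eq_getElem t 0 h
      have hgi1 : t.getD (i - 1) 0 = t[i - 1] := List.getD_eq_getElem t 0 hi1
      have hlt : t.length - (i + 1) < n := by omega
      split at hrun
      · next hd =>
        split at hrun
        · next hc3 =>
          -- cnt = 2, so t[i-1]-1 ∈ t; triple at t[i-1]-1
          have hc2 : cnt = 2 := by omega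
          rcases hinv with h1' | ⟨_, hmem⟩
          · omega
          · refine ⟨t.getD (i - 1) 0 - 1, hmem, ?_, ?_⟩
            · have : t.getD (i - 1) 0 - 1 + 1 = t[i - 1] := by omega
              rw [this]; exact List.getElem_mem hi1
            · have : t.getD (i - 1) 0 - 1 + 2 = t[i] := by rw [hgi1] at hd ⊢; omega
              rw [this]; exact List.getElem_mem h
        · next hc3 =>
          refine ih _ hlt (i + 1) (cnt + 1) (by omega) ?_ hrun rfl
          rcases hinv with h1' | ⟨h2', _⟩
          · right
            refine ⟨by omega, ?_⟩
            have : t.getD (i + 1 - 1) 0 - 1 = t[i - 1] := by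
              simp only [Nat.add_sub_cancel, hgi]
              rw [hgi1] at hd; omega
            rw [this]; exact List.getElem_mem hi1
          · omega
      · split at hrun
        · next hd0 =>
          refine ih _ hlt (i + 1) cnt (by omega) ?_ hrun rfl
          rcases hinv with h1' | ⟨h2', hmem⟩
          · exact Or.inl h1'
          · right
            refine ⟨h2', ?_⟩
            have : t.getD (i + 1 - 1) 0 - 1 = t.getD (i - 1) 0 - 1 := by
              simp only [Nat.add_sub_cancel, hgi, hgi1] at hd0 ⊢; omega
            rw [this]; exact hmem
        · simp only [show ¬((1 : Int) = 3) by norm_num, if_false] at hrun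
          exact ih _ hlt (i + 1) 1 (by omega) (Or.inl rfl) hrun rfl
    · exact absurd hrun (by simp)

-- sorted monotonicity on indices
lemma mono_of_pairwise {t : List Int} (ht : t.Pairwise (· ≤ ·)) {a b : Nat}
    (hab : a ≤ b) (hb : b < t.length) : t[a]'(by omega) ≤ t[b] := by
  rcases Nat.lt_or_ge a b with h | h
  · exact (List.pairwise_iff_getElem.mp ht) a b (by omega) hb h
  · have : a = b := by omega
    subst this; exact le_refl _

-- A-side completeness: a reachable triple forces the loop to return true
lemma runA_loop_complete (t : List Int) (ht : t.Pairwise (· ≤ ·)) :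
    ∀ i cnt, 1 ≤ i → (cnt = 1 ∨ cnt = 2) →
    ((∃ y, y ∈ t.drop (i - 1) ∧ (y + 1) ∈ t ∧ (y + 2) ∈ t) ∨
     (cnt = 2 ∧ ∃ y, (i - 1 < t.length ∧ t.getD (i - 1) 0 = y + 1) ∧ (y + 2) ∈ t)) →
    runA_loop t i cnt = some true := by
  intro i cnt h1 hcnt hC
  induction hfu : t.length - i using Nat.strong_induction_on generalizing i cnt with
  | _ n ih =>
    -- first: i < t.length in both cases of hC
    have hi : i < t.length := by
      rcases hC with ⟨y, hy, h1m, h2m⟩ | ⟨hc2, y, ⟨hi1, hgd⟩, h2m⟩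
      · obtain ⟨ky, hky', hkyv⟩ := List.mem_iff_getElem.mp h1m
        have hlen : i - 1 < t.length := by
          by_contra hc
          simp [List.drop_eq_nil_of_le (by omega : t.length ≤ i - 1)] at hy
        obtain ⟨m, hm, hmv⟩ := List.mem_iff_getElem.mp hy
        rw [List.getElem_drop] at hmv
        have hmlen : i - 1 + m < t.length := by
          have := (List.length_drop (l := t) (i := i - 1)) ▸ hm; omega
        by_contra hc
        have := mono_of_pairwise ht (by omega : ky ≤ i - 1 + m) hmlen
        rw [hkyv, hmv] at this; omega
      · obtain ⟨ky, hky', hkyv⟩ := List.mem_iff_getElem.mp h2m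
        rw [List.getD_eq_getElem t 0 hi1] at hgd
        by_contra hc
        have := mono_of_pairwise ht (by omega : ky ≤ i - 1) hi1
        rw [hkyv, hgd] at this; omega
    have hi1 : i - 1 < t.length := by omega
    have hgi : t.getD i 0 = t[i] := List.getD_eq_getElem t 0 hi
    have hgi1 : t.getD (i - 1) 0 = t[i - 1]'hi1 := List.getD_eq_getElem t 0 hi1
    have hgi' : t.getD (i + 1 - 1) 0 = t[i] := by
      simpa [Nat.add_sub_cancel] using hgi
    have hlt : t.length - (i + 1) < n := by omega
    have hdropi : t.drop i = t[i] :: t.drop (i + 1) := List.drop_eq_getElem_cons hi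
    rcases hC with ⟨y, hy, h1m, h2m⟩ | ⟨hc2, y, ⟨_, hgd⟩, h2m⟩
    · by_cases hyi : y ∈ t.drop i
      · -- triple still ahead whatever this step does
        rw [runA_loop, dif_pos hi]
        have hnext : ∀ c : Int, (c = 1 ∨ c = 2) → runA_loop t (i + 1) c = some true := by
          intro c hc
          exact ih _ hlt (i + 1) c (by omega) hc
            (Or.inl ⟨y, by simpa using hyi, h1m, h2m⟩) rfl
        split
        · split
          · rfl
          · next hc3 => exact hnext (cnt + 1) (by omega)
        · split
          · exact hnext cnt hcnt
          · simp only [show ¬((1 : Int) = 3) by norm_num, if_false]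
            exact hnext 1 (Or.inl rfl)
      · -- y sits exactly at i-1; t[i] must be y or y+1, and y is excluded
        have hdrop : t.drop (i - 1) = t[i - 1]'hi1 :: t.drop i := by
          have := List.drop_eq_getElem_cons hi1
          rwa [show i - 1 + 1 = i by omega] at this
        have hyi1 : t[i - 1]'hi1 = y := by
          rw [hdrop] at hy
          rcases List.mem_cons.mp hy with h | h
          · omega
          · exact absurd h hyi
        obtain ⟨ky, hky', hkyv⟩ := List.mem_iff_getElem.mp h1m
        have hky_gt : i - 1 < ky := by
          by_contra hc
          have := mono_of_pairwise ht (by omega : ky ≤ i - 1) hi1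
          rw [hkyv, hyi1] at this; omega
        have hti_le : t[i] ≤ y + 1 := by
          rcases Nat.lt_or_ge i ky with h | h
          · have := mono_of_pairwise ht (by omega : i ≤ ky) hky'
            rw [hkyv] at this; omega
          · have : ky = i := by omega
            subst this; omega
        have hti_ge : y ≤ t[i] := by
          have := mono_of_pairwise ht (by omega : i - 1 ≤ i) hi
          rw [hyi1] at this; omega
        have hti : t[i] = y + 1 := by
          rcases (by omega : t[i] = y ∨ t[i] = y + 1) with h | h
          · exact absurd (h ▸ hdropi ▸ List.mem_cons_self) hyi
          · exact h
        rw [runA_loop, dif_pos hi, if_pos (by rw [hgi, hgi1, hyi1, hti]; ring)]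
        rcases hcnt with hc | hc
        · rw [if_neg (by omega)]
          refine ih _ hlt (i + 1) (cnt + 1) (by omega) (by omega) ?_ rfl
          right
          exact ⟨by omega, y, ⟨by omega, by rw [hgi', hti]⟩, h2m⟩
        · rw [if_pos (by omega)]
    · -- cnt = 2 and t[i-1] = y+1 with y+2 ∈ t ahead
      rw [List.getD_eq_getElem t 0 hi1] at hgd
      obtain ⟨ky, hky', hkyv⟩ := List.mem_iff_getElem.mp h2m
      have hky_gt : i - 1 < ky := by
        by_contra hc
        have := mono_of_pairwise ht (by omega : ky ≤ i - 1) hi1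
        rw [hkyv, hgd] at this; omega
      have hti_le : t[i] ≤ y + 2 := by
        rcases Nat.lt_or_ge i ky with h | h
        · have := mono_of_pairwise ht (by omega : i ≤ ky) hky'
          rw [hkyv] at this; omega
        · have : ky = i := by omega
          subst this; omega
      have hti_ge : y + 1 ≤ t[i] := by
        have := mono_of_pairwise ht (by omega : i - 1 ≤ i) hi
        rw [hgd] at this; omega
      rcases (by omega : t[i] = y + 1 ∨ t[i] = y + 2) with h | h
      · -- duplicate: continue with cnt = 2
        rw [runA_loop, dif_pos hi, if_neg (by rw [hgi, hgi1, hgd, h]; omega),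
            if_pos (by rw [hgi, hgi1, hgd, h]; omega)]
        refine ih _ hlt (i + 1) cnt (by omega) hcnt ?_ rfl
        right
        refine ⟨hc2, y, ⟨by omega, ?_⟩, h2m⟩
        rw [hgi', h]
      · -- step of 1 with cnt = 2: return true
        rw [runA_loop, dif_pos hi, if_pos (by rw [hgi, hgi1, hgd, h]; omega),
            if_pos (by omega)]

lemma hasTriple_sorted (li_ : List Int) :
    HasTriple (PySem.List.sorted li_ (fun x => x) false) ↔ HasTriple li_ := by
  unfold HasTriple
  simp [PySem.List.mem_sorted]

-- ===== VERDICT (by name: the statement is the Claim_ definition above) =====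
theorem run__spec : Claim_equal_run_ := by
  intro li_ _
  unfold Spec_run_
  set t := PySem.List.sorted li_ (fun x => x) false with htdef
  have ht : t.Pairwise (· ≤ ·) := by
    simpa using PySem.List.sorted_pairwise li_ (fun x => x)
  by_cases hP : HasTriple li_
  · rw [run__alt_pos li_ hP]
    obtain ⟨x, hx, h1, h2⟩ := (hasTriple_sorted li_).mpr hP
    exact runA_loop_complete t ht 1 1 le_rfl (Or.inl rfl)
      (Or.inl ⟨x, by simp only [Nat.sub_self, List.drop_zero]; exact hx, h1, h2⟩)
  · rw [run__alt_neg li_ hP]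
    rcases runA_loop_ne_false t 1 1 with h | h
    · exact h
    · exact absurd ((hasTriple_sorted li_).mp
        (runA_loop_sound t 1 1 le_rfl (Or.inl rfl) h)) hP
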